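-- pv_equiv track=rewrite | github.com/mosquitoexe/Ligacoes_quimicas | ligacao_quimica.py | impressao
-- ===== SOURCE A (Python) =====
-- def impressao(z):
--     K = []
--     L = []
--     M = []
--     N = []
--     O = []
--     P = []
--     Q = []
--     for i in range(len(z)):
--         elem = z[i]
--         if "1" in elem[0]:
--             K.append(elem)
--         elif "2" in elem[0]:
--             L.append(elem)
--         elif "3" in elem[0]:
--             M.append(elem)
--         elif "4" in elem[0]:
--             N.append(elem)
--         elif "5" in elem[0]:
--             O.append(elem)
--         elif "6" in elem[0]:
--             P.append(elem)
--         elif "7" in elem[0]: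
--             Q.append(elem)
--
--     camadas = [K, L, M, N, O, P, Q]
--     filtro = []
--     for i in range(len(camadas)):
--         if len(camadas[i]) != 0:
--             filtro.append(camadas[i])
--     return filtro
-- ===== SOURCE B (Python) =====
-- def impressao(z):
--     def key(e):
--         for i, d in enumerate("1234567"):
--             if d in e[0]:
--                 return i
--         return 7
--     return [g for g in ([e for e in z if key(e) == k] for k in range(7)) if g]
-- ===== Notes on version B (the rewrite author's own statement) =====
-- stated objective: alternative
-- what changed: Replaces the single pass with seven named accumulator lists plus a second filtering loop by a key function (index of the first matching digit) and seven staged filter passes, one per key value, keeping only the non-empty groups.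
import Mathlib
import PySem

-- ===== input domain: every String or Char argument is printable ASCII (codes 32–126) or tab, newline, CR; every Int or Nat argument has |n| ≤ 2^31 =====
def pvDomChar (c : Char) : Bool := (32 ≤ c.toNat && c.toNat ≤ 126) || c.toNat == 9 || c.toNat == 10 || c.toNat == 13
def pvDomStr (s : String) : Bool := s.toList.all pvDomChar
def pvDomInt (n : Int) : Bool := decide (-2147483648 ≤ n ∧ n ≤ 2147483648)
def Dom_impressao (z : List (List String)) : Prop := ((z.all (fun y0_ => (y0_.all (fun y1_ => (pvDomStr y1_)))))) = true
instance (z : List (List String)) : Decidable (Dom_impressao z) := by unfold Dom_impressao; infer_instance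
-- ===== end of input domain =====

-- B replaces A's single pass with seven named accumulator lists (elif chain) plus a second
-- filtering loop by a key function and seven staged filter passes, one per key value
-- (objective: alternative).

-- ===== PORT A =====
structure StA where
  K : List (List String)
  L : List (List String)
  M : List (List String)
  N : List (List String)
  O : List (List String)
  P : List (List String)
  Q : List (List String)
deriving Repr, DecidableEq

def stepA (st : StA) (elem : List String) : StA :=
  let h := (PySem.List.pyGet? elem 0).getD ""
  if PySem.Str.isIn "1" h then { st with K := st.K ++ [elem] }
  else if PySem.Str.isIn "2" h then { st with L := st.L ++ [elem] }
  else if PySem.Str.isIn "3" h then { st with M := st.M ++ [elem] }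
  else if PySem.Str.isIn "4" h then { st with N := st.N ++ [elem] }
  else if PySem.Str.isIn "5" h then { st with O := st.O ++ [elem] }
  else if PySem.Str.isIn "6" h then { st with P := st.P ++ [elem] }
  else if PySem.Str.isIn "7" h then { st with Q := st.Q ++ [elem] }
  else st

def impressao (z : List (List String)) : List (List (List String)) :=
  let st := z.foldl stepA ⟨[], [], [], [], [], [], []⟩
  let camadas := [st.K, st.L, st.M, st.N, st.O, st.P, st.Q]
  camadas.foldl (fun filtro c => if c.length ≠ 0 then filtro ++ [c] else filtro) []

-- ===== PORT B =====
def digitsB : List String := ["1", "2", "3", "4", "5", "6", "7"]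

-- B's helper 'key': index of the first digit of "1234567" occurring in e[0], else 7
def keyB (e : List String) : Int :=
  let h := (PySem.List.pyGet? e 0).getD ""
  match (PySem.List.enumerate digitsB 0).find? (fun p => PySem.Str.isIn p.2 h) with
  | some p => p.1
  | none => 7

def impressao_alt (z : List (List String)) : List (List (List String)) :=
  ((PySem.List.pyRange 0 7 1).map (fun k => z.filter (fun e => keyB e == k))).filter
    (fun g => decide (g ≠ []))

-- ===== PRECONDITION & SPEC =====
-- Pre_ excludes inputs containing an empty inner list: there A (and B) raise IndexError on elem[0].
def Pre_impressao (z : List (List String)) : Prop := ∀ e ∈ z, e ≠ []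
instance (z : List (List String)) : Decidable (Pre_impressao z) := by unfold Pre_impressao; infer_instance
def pvWitness_impressao : List (List String) := [["1a", "x"], ["z7"], ["none"]]
def Spec_impressao (z : List (List String)) (out : List (List (List String))) : Prop := out = impressao_alt z
instance (z : List (List String)) (out : List (List (List String))) : Decidable (Spec_impressao z out) := by unfold Spec_impressao; infer_instance

-- ===== CLAIM (what is proved, stated in full; the proofs are below) =====
def Claim_equal_impressao : Prop := ∀ (z : List (List String)), Dom_impressao z → Pre_impressao z → Spec_impressao z (impressao z)

-- ===== LEMMAS AND PROOFS =====

-- A's elif chain on one element, expressed through B's key function.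
theorem stepA_keyB (st' : StA) (e : List String) : stepA st' e =
        ⟨st'.K ++ (if keyB e == 0 then [e] else []), st'.L ++ (if keyB e == 1 then [e] else []),
         st'.M ++ (if keyB e == 2 then [e] else []), st'.N ++ (if keyB e == 3 then [e] else []),
         st'.O ++ (if keyB e == 4 then [e] else []), st'.P ++ (if keyB e == 5 then [e] else []),
         st'.Q ++ (if keyB e == 6 then [e] else [])⟩ := by
  unfold stepA keyB
  simp only [digitsB, PySem.List.enumerate_cons, PySem.List.enumerate_nil, Int.reduceAdd]
  by_cases h1 : PySem.Str.isIn "1" ((PySem.List.pyGet? e 0).getD "") = true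
  · have hf : List.find? (fun p => PySem.Str.isIn p.2 ((PySem.List.pyGet? e 0).getD "")) [((0 : Int), "1"), ((1 : Int), "2"), ((2 : Int), "3"), ((3 : Int), "4"), ((4 : Int), "5"), ((5 : Int), "6"), ((6 : Int), "7")] = some ((0 : Int), "1") := List.find?_cons_of_pos (by simpa using h1)
    simp only [hf, h1, Bool.false_eq_true, if_true, if_false, Int.reduceBEq, List.append_nil]
  · have hf1 : List.find? (fun p => PySem.Str.isIn p.2 ((PySem.List.pyGet? e 0).getD "")) [((0 : Int), "1"), ((1 : Int), "2"), ((2 : Int), "3"), ((3 : Int), "4"), ((4 : Int), "5"), ((5 : Int), "6"), ((6 : Int), "7")] = List.find? (fun p => PySem.Str.isIn p.2 ((PySem.List.pyGet? e 0).getD "")) [((1 : Int), "2"), ((2 : Int), "3"), ((3 : Int), "4"), ((4 : Int), "5"), ((5 : Int), "6"), ((6 : Int), "7")] := List.find?_cons_of_neg (by simpa using h1)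
    by_cases h2 : PySem.Str.isIn "2" ((PySem.List.pyGet? e 0).getD "") = true
    · have hf : List.find? (fun p => PySem.Str.isIn p.2 ((PySem.List.pyGet? e 0).getD "")) [((1 : Int), "2"), ((2 : Int), "3"), ((3 : Int), "4"), ((4 : Int), "5"), ((5 : Int), "6"), ((6 : Int), "7")] = some ((1 : Int), "2") := List.find?_cons_of_pos (by simpa using h2)
      simp only [hf1, hf, h1, h2, Bool.false_eq_true, if_true, if_false, Int.reduceBEq, List.append_nil]
    · have hf2 : List.find? (fun p => PySem.Str.isIn p.2 ((PySem.List.pyGet? e 0).getD "")) [((1 : Int), "2"), ((2 : Int), "3"), ((3 : Int), "4"), ((4 : Int), "5"), ((5 : Int), "6"), ((6 : Int), "7")] = List.find? (fun p => PySem.Str.isIn p.2 ((PySem.List.pyGet? e 0).getD "")) [((2 : Int), "3"), ((3 : Int), "4"), ((4 : Int), "5"), ((5 : Int), "6"), ((6 : Int), "7")] := List.find?_cons_of_neg (by simpa using h2)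
      by_cases h3 : PySem.Str.isIn "3" ((PySem.List.pyGet? e 0).getD "") = true
      · have hf : List.find? (fun p => PySem.Str.isIn p.2 ((PySem.List.pyGet? e 0).getD "")) [((2 : Int), "3"), ((3 : Int), "4"), ((4 : Int), "5"), ((5 : Int), "6"), ((6 : Int), "7")] = some ((2 : Int), "3") := List.find?_cons_of_pos (by simpa using h3)
        simp only [hf1, hf2, hf, h1, h2, h3, Bool.false_eq_true, if_true, if_false, Int.reduceBEq, List.append_nil]
      · have hf3 : List.find? (fun p => PySem.Str.isIn p.2 ((PySem.List.pyGet? e 0).getD "")) [((2 : Int), "3"), ((3 : Int), "4"), ((4 : Int), "5"), ((5 : Int), "6"), ((6 : Int), "7")] = List.find? (fun p => PySem.Str.isIn p.2 ((PySem.List.pyGet? e 0).getD "")) [((3 : Int), "4"), ((4 : Int), "5"), ((5 : Int), "6"), ((6 : Int), "7")] := List.find?_cons_of_neg (by simpa using h3)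
        by_cases h4 : PySem.Str.isIn "4" ((PySem.List.pyGet? e 0).getD "") = true
        · have hf : List.find? (fun p => PySem.Str.isIn p.2 ((PySem.List.pyGet? e 0).getD "")) [((3 : Int), "4"), ((4 : Int), "5"), ((5 : Int), "6"), ((6 : Int), "7")] = some ((3 : Int), "4") := List.find?_cons_of_pos (by simpa using h4)
          simp only [hf1, hf2, hf3, hf, h1, h2, h3, h4, Bool.false_eq_true, if_true, if_false, Int.reduceBEq, List.append_nil]
        · have hf4 : List.find? (fun p => PySem.Str.isIn p.2 ((PySem.List.pyGet? e 0).getD "")) [((3 : Int), "4"), ((4 : Int), "5"), ((5 : Int), "6"), ((6 : Int), "7")] = List.find? (fun p => PySem.Str.isIn p.2 ((PySem.List.pyGet? e 0).getD "")) [((4 : Int), "5"), ((5 : Int), "6"), ((6 : Int), "7")] := List.find?_cons_of_neg (by simpa using h4)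
          by_cases h5 : PySem.Str.isIn "5" ((PySem.List.pyGet? e 0).getD "") = true
          · have hf : List.find? (fun p => PySem.Str.isIn p.2 ((PySem.List.pyGet? e 0).getD "")) [((4 : Int), "5"), ((5 : Int), "6"), ((6 : Int), "7")] = some ((4 : Int), "5") := List.find?_cons_of_pos (by simpa using h5)
            simp only [hf1, hf2, hf3, hf4, hf, h1, h2, h3, h4, h5, Bool.false_eq_true, if_true, if_false, Int.reduceBEq, List.append_nil]
          · have hf5 : List.find? (fun p => PySem.Str.isIn p.2 ((PySem.List.pyGet? e 0).getD "")) [((4 : Int), "5"), ((5 : Int), "6"), ((6 : Int), "7")] = List.find? (fun p => PySem.Str.isIn p.2 ((PySem.List.pyGet? e 0).getD "")) [((5 : Int), "6"), ((6 : Int), "7")] := List.find?_cons_of_neg (by simpa using h5)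
            by_cases h6 : PySem.Str.isIn "6" ((PySem.List.pyGet? e 0).getD "") = true
            · have hf : List.find? (fun p => PySem.Str.isIn p.2 ((PySem.List.pyGet? e 0).getD "")) [((5 : Int), "6"), ((6 : Int), "7")] = some ((5 : Int), "6") := List.find?_cons_of_pos (by simpa using h6)
              simp only [hf1, hf2, hf3, hf4, hf5, hf, h1, h2, h3, h4, h5, h6, Bool.false_eq_true, if_true, if_false, Int.reduceBEq, List.append_nil]
            · have hf6 : List.find? (fun p => PySem.Str.isIn p.2 ((PySem.List.pyGet? e 0).getD "")) [((5 : Int), "6"), ((6 : Int), "7")] = List.find? (fun p => PySem.Str.isIn p.2 ((PySem.List.pyGet? e 0).getD "")) [((6 : Int), "7")] := List.find?_cons_of_neg (by simpa using h6)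
              by_cases h7 : PySem.Str.isIn "7" ((PySem.List.pyGet? e 0).getD "") = true
              · have hf : List.find? (fun p => PySem.Str.isIn p.2 ((PySem.List.pyGet? e 0).getD "")) [((6 : Int), "7")] = some ((6 : Int), "7") := List.find?_cons_of_pos (by simpa using h7)
                simp only [hf1, hf2, hf3, hf4, hf5, hf6, hf, h1, h2, h3, h4, h5, h6, h7, Bool.false_eq_true, if_true, if_false, Int.reduceBEq, List.append_nil]
              · have hf7 : List.find? (fun p => PySem.Str.isIn p.2 ((PySem.List.pyGet? e 0).getD "")) [((6 : Int), "7")] = List.find? (fun p => PySem.Str.isIn p.2 ((PySem.List.pyGet? e 0).getD "")) [] := List.find?_cons_of_neg (by simpa using h7)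
                simp only [hf1, hf2, hf3, hf4, hf5, hf6, hf7, h1, h2, h3, h4, h5, h6, h7, List.find?_nil, Bool.false_eq_true, if_false, Int.reduceBEq, List.append_nil]

theorem app_if_cons {α : Type} (c : Bool) (a : List α) (x : α) (t : List α) :
    (a ++ (if c then [x] else [])) ++ t = a ++ (if c then x :: t else t) := by
  cases c <;> simp

-- A's fold state characterised bucket-by-bucket as B's key-filters of the processed prefix.
theorem foldA_char (z : List (List String)) (st : StA) :
    z.foldl stepA st =
      ⟨st.K ++ z.filter (fun e => keyB e == 0), st.L ++ z.filter (fun e => keyB e == 1),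
       st.M ++ z.filter (fun e => keyB e == 2), st.N ++ z.filter (fun e => keyB e == 3),
       st.O ++ z.filter (fun e => keyB e == 4), st.P ++ z.filter (fun e => keyB e == 5),
       st.Q ++ z.filter (fun e => keyB e == 6)⟩ := by
  induction z generalizing st with
  | nil => simp [List.filter]
  | cons e tl ih =>
    rw [List.foldl_cons, stepA_keyB, ih]
    simp only [List.filter_cons, app_if_cons]

-- ===== VERDICT =====
theorem impressao_spec : Claim_equal_impressao := by
  intro z _ _
  unfold Spec_impressao impressao impressao_alt
  rw [foldA_char]
  have hr : PySem.List.pyRange 0 7 1 = [0, 1, 2, 3, 4, 5, 6] := by decide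
  rw [hr]
  simp only [List.map_cons, List.map_nil, List.nil_append]
  by_cases h0 : z.filter (fun e => keyB e == 0) = [] <;>
  by_cases h1 : z.filter (fun e => keyB e == 1) = [] <;>
  by_cases h2 : z.filter (fun e => keyB e == 2) = [] <;>
  by_cases h3 : z.filter (fun e => keyB e == 3) = [] <;>
  by_cases h4 : z.filter (fun e => keyB e == 4) = [] <;>
  by_cases h5 : z.filter (fun e => keyB e == 5) = [] <;>
  by_cases h6 : z.filter (fun e => keyB e == 6) = [] <;>
    simp [h0, h1, h2, h3, h4, h5, h6, List.foldl, List.filter, List.length_eq_zero_iff]
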